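-- pv_equiv track=rewrite | github.com/WdwKana/sphinx | mix_data.py | _episode_slices_from_end_idxs
-- ===== SOURCE A (Python) =====
-- def _episode_slices_from_end_idxs(T, end_idxs_inclusive):
--     """
--     Build episode slices where each end index is inclusive.
--     Returns list of (start, end_exclusive).
--     """
--     end_idxs = [int(e) for e in end_idxs_inclusive if 0 <= int(e) < int(T)]
--     end_idxs = sorted(set(end_idxs))
--     slices = []
--     start = 0
--     for end in end_idxs:
--         end_excl = end + 1
--         if end_excl > start:
--             slices.append((start, end_excl))
--         start = end_excl
--     if start < int(T):
--         slices.append((start, int(T)))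
--     return slices
-- ===== SOURCE B (Python) =====
-- def _episode_slices_from_end_idxs(T, end_idxs_inclusive):
--     t = int(T)
--
--     def rec(start, stop, cuts):
--         # slices covering [start, stop); every cut lies in [start, stop)
--         if not cuts:
--             return [(start, stop)] if start < stop else []
--         p = cuts[len(cuts) // 2]
--         left = [c for c in cuts if c < p]
--         right = [c for c in cuts if c > p]
--         return rec(start, p + 1, left) + rec(p + 1, stop, right)
--
--     return rec(0, t, [int(e) for e in end_idxs_inclusive if 0 <= int(e) < t])
-- ===== Notes on version B (the rewrite author's own statement) =====
-- stated objective: alternative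
-- what changed: Drops A's sort+set+running-start-fold pipeline: B is a divide-and-conquer that picks a pivot cut, partitions the unsorted cuts, and emits the slices of each sub-interval directly by recursion (duplicates vanish in the strict partition); no sorting and no dedup set are ever built.
import Mathlib
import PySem

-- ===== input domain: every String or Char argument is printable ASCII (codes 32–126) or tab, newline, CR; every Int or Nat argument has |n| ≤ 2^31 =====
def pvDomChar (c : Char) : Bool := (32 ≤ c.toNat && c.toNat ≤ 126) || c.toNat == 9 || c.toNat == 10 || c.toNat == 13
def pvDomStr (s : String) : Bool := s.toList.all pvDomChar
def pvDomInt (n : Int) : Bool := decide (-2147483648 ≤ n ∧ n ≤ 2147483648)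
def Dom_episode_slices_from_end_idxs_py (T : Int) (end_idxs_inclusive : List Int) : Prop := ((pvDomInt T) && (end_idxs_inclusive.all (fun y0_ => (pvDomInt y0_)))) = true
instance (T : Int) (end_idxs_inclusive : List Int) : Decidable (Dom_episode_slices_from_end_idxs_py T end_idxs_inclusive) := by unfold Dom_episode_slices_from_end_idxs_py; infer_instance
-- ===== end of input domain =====

-- B replaces A's sort+set+running-start fold by a divide-and-conquer that partitions
-- the unsorted cuts around a pivot and emits each sub-interval's slices directly
-- (alternative decomposition: no sorting and no dedup set); same result.

-- ===== PORT A =====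
-- the body of A's for-loop: end_excl = end + 1; append (start, end_excl) if end_excl > start; start = end_excl
def pvStepA (st : List (Int × Int) × Int) (e : Int) : List (Int × Int) × Int :=
  let end_excl := e + 1
  (if end_excl > st.2 then st.1 ++ [(st.2, end_excl)] else st.1, end_excl)

def episode_slices_from_end_idxs_py (T : Int) (end_idxs_inclusive : List Int) : List (Int × Int) :=
  let end_idxs := end_idxs_inclusive.filter (fun e => decide (0 ≤ e) && decide (e < T))
  let end_idxs := PySem.List.sorted (PySem.Set.ofList end_idxs) (fun x => x) false
  let st := end_idxs.foldl pvStepA ([], 0)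
  if st.2 < T then st.1 ++ [(st.2, T)] else st.1

-- ===== PORT B =====
-- termination helper for pvRecB: a strict partition drops the pivot, so it shrinks
lemma pvRecB_dec (cuts : List Int) (p : Int) (hp : p ∈ cuts) (f : Int → Bool)
    (hf : f p = false) : (cuts.filter f).length < cuts.length := by
  apply List.length_filter_lt_length_iff_exists.mpr
  exact ⟨p, hp, by simp [hf]⟩

-- cuts[len(cuts)//2] of a nonempty list is a member
lemma pvPivot_mem (cuts : List Int) (p : Int)
    (h : PySem.List.pyGet? cuts (PySem.Int.floordiv cuts.length 2) = some p) : p ∈ cuts := by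
  simp only [PySem.List.pyGet?, PySem.List.pyIdx?] at h
  split at h <;>
  · rcases Option.bind_eq_some_iff.mp h with ⟨a, -, ha⟩
    exact List.mem_of_getElem? ha


-- Python B's inner rec(start, stop, cuts)
def pvRecB (start stop : Int) (cuts : List Int) : List (Int × Int) :=
  if cuts = [] then
    if start < stop then [(start, stop)] else []
  else
    match hp : PySem.List.pyGet? cuts (PySem.Int.floordiv cuts.length 2) with
    | none => []  -- unreachable: the middle index of a nonempty list is in range
    | some p =>
      let left := cuts.filter (fun c => decide (c < p))
      let right := cuts.filter (fun c => decide (p < c))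
      pvRecB start (p + 1) left ++ pvRecB (p + 1) stop right
termination_by cuts.length
decreasing_by
  · rw [List.filter_attach cuts (fun c => decide (c < p)), List.length_unattach, List.length_map, List.length_attach]
    exact pvRecB_dec cuts p (pvPivot_mem cuts p hp)
      (fun c => decide (c < p)) (decide_eq_false (lt_irrefl p))
  · rw [List.filter_attach cuts (fun c => decide (p < c)), List.length_unattach, List.length_map, List.length_attach]
    exact pvRecB_dec cuts p (pvPivot_mem cuts p hp)
      (fun c => decide (p < c)) (decide_eq_false (lt_irrefl p))

def episode_slices_from_end_idxs_py_alt (T : Int) (end_idxs_inclusive : List Int) : List (Int × Int) :=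
  pvRecB 0 T (end_idxs_inclusive.filter (fun e => decide (0 ≤ e) && decide (e < T)))

-- ===== PRECONDITION & SPEC =====
def Spec_episode_slices_from_end_idxs_py (T : Int) (end_idxs_inclusive : List Int) (out : List (Int × Int)) : Prop := out = episode_slices_from_end_idxs_py_alt T end_idxs_inclusive
instance (T : Int) (end_idxs_inclusive : List Int) (out : List (Int × Int)) : Decidable (Spec_episode_slices_from_end_idxs_py T end_idxs_inclusive out) := by unfold Spec_episode_slices_from_end_idxs_py; infer_instance

-- ===== CLAIM (what is proved, stated in full; the proofs are below) =====
def Claim_equal_episode_slices_from_end_idxs_py : Prop := ∀ (T : Int) (end_idxs_inclusive : List Int), Dom_episode_slices_from_end_idxs_py T end_idxs_inclusive → Spec_episode_slices_from_end_idxs_py T end_idxs_inclusive (episode_slices_from_end_idxs_py T end_idxs_inclusive)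

-- ===== LEMMAS AND PROOFS =====

-- the middle index used by pvRecB, as a Nat
lemma pvMid_eq (n : Nat) : PySem.Int.floordiv (n : Int) 2 = ((n / 2 : Nat) : Int) := by
  show Int.fdiv (n : Int) 2 = ((n / 2 : Nat) : Int)
  rw [Int.fdiv_eq_ediv_of_nonneg _ (by positivity)]
  omega

-- common intermediate form: the slices generated left to right from a strictly
-- increasing list of cuts, starting at `start` and ending at `t`
def pairsSpec (start : Int) (s : List Int) (t : Int) : List (Int × Int) :=
  match s with
  | [] => if start < t then [(start, t)] else []
  | m :: s' => (start, m + 1) :: pairsSpec (m + 1) s' t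

-- A's fold over a strictly-increasing list of cuts ≥ start is pairsSpec
lemma loopA_eq (t : Int) (s : List Int) : ∀ (start : Int) (acc : List (Int × Int)),
    (∀ e ∈ s, start ≤ e) → s.Pairwise (· < ·) →
    (let st := s.foldl pvStepA (acc, start);
     if st.2 < t then st.1 ++ [(st.2, t)] else st.1) = acc ++ pairsSpec start s t := by
  induction s with
  | nil =>
    intro start acc _ _
    simp only [List.foldl_nil, pairsSpec]
    split_ifs <;> simp
  | cons m s' ih =>
    intro start acc hle hpw
    have hsm : start ≤ m := hle m (by simp)
    have hpw' := List.pairwise_cons.mp hpw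
    have hstep : pvStepA (acc, start) m = (acc ++ [(start, m + 1)], m + 1) := by
      simp [pvStepA]; omega
    simp only [List.foldl_cons, hstep]
    rw [ih (m + 1) (acc ++ [(start, m + 1)]) (fun e he => by have := hpw'.1 e he; omega) hpw'.2]
    simp [pairsSpec]

def distSorted (l : List Int) : List Int :=
  PySem.List.sorted (PySem.Set.ofList l) (fun x => x) false

lemma mem_distSorted (l : List Int) (x : Int) : x ∈ distSorted l ↔ x ∈ l := by
  unfold distSorted
  rw [PySem.List.mem_sorted, PySem.Set.mem_ofList]

lemma distSorted_pairwise (l : List Int) : (distSorted l).Pairwise (· < ·) :=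
  PySem.List.sorted_ofList_pairwise_lt l

-- two strictly increasing integer lists with the same members are equal
lemma pairwise_lt_ext (l₁ l₂ : List Int) (h₁ : l₁.Pairwise (· < ·)) (h₂ : l₂.Pairwise (· < ·))
    (hm : ∀ x, x ∈ l₁ ↔ x ∈ l₂) : l₁ = l₂ := by
  have hn₁ : l₁.Nodup := h₁.imp (fun h => ne_of_lt h)
  have hn₂ : l₂.Nodup := h₂.imp (fun h => ne_of_lt h)
  have hperm : l₁.Perm l₂ := (List.perm_ext_iff_of_nodup hn₁ hn₂).mpr hm
  exact hperm.eq_of_pairwise (fun a b _ _ h1 h2 => absurd h1 (lt_asymm h2)) h₁ h₂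

lemma distSorted_nil : distSorted [] = [] := by decide

-- splitting the distinct-sorted cuts at a pivot p ∈ cuts
lemma distSorted_split (cuts : List Int) (p : Int) (hp : p ∈ cuts) :
    distSorted cuts =
      distSorted (cuts.filter (fun c => decide (c < p))) ++
        p :: distSorted (cuts.filter (fun c => decide (p < c))) := by
  apply pairwise_lt_ext
  · exact distSorted_pairwise _
  · rw [List.pairwise_append]
    refine ⟨distSorted_pairwise _, ?_, ?_⟩
    · refine List.pairwise_cons.mpr ⟨?_, distSorted_pairwise _⟩
      intro y hy
      have := (List.mem_filter.mp ((mem_distSorted _ _).mp hy)).2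
      simpa using this
    · intro x hx y hy
      have hxp := (List.mem_filter.mp ((mem_distSorted _ _).mp hx)).2
      simp at hxp
      rcases List.mem_cons.mp hy with rfl | hy'
      · exact hxp
      · have := (List.mem_filter.mp ((mem_distSorted _ _).mp hy')).2
        simp at this
        omega
  · intro x
    rw [mem_distSorted, List.mem_append, List.mem_cons, mem_distSorted, mem_distSorted,
        List.mem_filter, List.mem_filter]
    constructor
    · intro hx
      rcases lt_trichotomy x p with h | rfl | h
      · exact Or.inl ⟨hx, by simpa using h⟩
      · exact Or.inr (Or.inl rfl)
      · exact Or.inr (Or.inr ⟨hx, by simpa using h⟩)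
    · rintro (⟨hx, _⟩ | rfl | ⟨hx, _⟩) <;> first | exact hx | exact hp

-- pairsSpec splits at a cut p that dominates the left part
lemma pairsSpec_append (p stop : Int) (l r : List Int) : ∀ start : Int, start ≤ p →
    (∀ m ∈ l, m < p) →
    pairsSpec start (l ++ p :: r) stop =
      pairsSpec start l (p + 1) ++ pairsSpec (p + 1) r stop := by
  induction l with
  | nil =>
    intro start hs _
    simp only [List.nil_append, pairsSpec]
    rw [if_pos (by omega)]
    simp
  | cons m l' ih =>
    intro start _ hlt
    simp only [List.cons_append, pairsSpec, List.cons_append]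
    rw [ih (m + 1) (by have := hlt m (by simp); omega) (fun x hx => hlt x (by simp [hx]))]

-- B's divide-and-conquer computes pairsSpec of the distinct-sorted cuts
lemma recB_eq (start stop : Int) (cuts : List Int)
    (hb : ∀ c ∈ cuts, start ≤ c ∧ c < stop) :
    pvRecB start stop cuts = pairsSpec start (distSorted cuts) stop := by
  induction hn : cuts.length using Nat.strong_induction_on generalizing start stop cuts with
  | _ n ih =>
  rw [pvRecB]
  by_cases hc : cuts = []
  · subst hc
    rw [distSorted_nil]
    simp [pairsSpec]
  · simp only [hc, if_false]
    split
    · -- unreachable: middle index of a nonempty list is in range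
      exfalso
      rename_i hp
      rw [pvMid_eq, PySem.List.pyGet?_natCast] at hp
      have := List.getElem?_eq_none_iff.mp hp
      have hlen : cuts.length ≠ 0 := fun h => hc (List.length_eq_zero_iff.mp h)
      omega
    · rename_i p hp
      have hpm : p ∈ cuts := pvPivot_mem cuts p hp
      have hls := pvRecB_dec cuts p hpm (fun c => decide (c < p)) (by simp)
      have hrs := pvRecB_dec cuts p hpm (fun c => decide (p < c)) (by simp)
      subst hn
      rw [ih _ hls start (p + 1) _ (by
            intro c hcm
            have h1 := (hb c (List.mem_filter.mp hcm).1).1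
            have h2 := (List.mem_filter.mp hcm).2
            simp at h2
            omega) rfl,
          ih _ hrs (p + 1) stop _ (by
            intro c hcm
            have h1 := (hb c (List.mem_filter.mp hcm).1).2
            have h2 := (List.mem_filter.mp hcm).2
            simp at h2
            omega) rfl]
      rw [distSorted_split cuts p hpm]
      rw [pairsSpec_append p stop _ _ start (hb p hpm).1
            (fun m hm => by
              have := (List.mem_filter.mp ((mem_distSorted _ _).mp hm)).2
              simpa using this)]

theorem main_equiv (T : Int) (l : List Int) :
    episode_slices_from_end_idxs_py T l = episode_slices_from_end_idxs_py_alt T l := by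
  unfold episode_slices_from_end_idxs_py episode_slices_from_end_idxs_py_alt
  dsimp only
  set cuts := l.filter (fun e => decide (0 ≤ e) && decide (e < T)) with hcuts
  have hb : ∀ c ∈ cuts, (0 : Int) ≤ c ∧ c < T := by
    intro c hc
    have := (List.mem_filter.mp hc).2
    simpa using this
  rw [recB_eq 0 T cuts hb]
  have hnn : ∀ e ∈ distSorted cuts, (0 : Int) ≤ e := by
    intro e he
    exact (hb e ((mem_distSorted _ _).mp he)).1
  exact loopA_eq T (distSorted cuts) 0 [] hnn (distSorted_pairwise cuts)

-- ===== VERDICT (by name: the statement is the Claim_ definition above) =====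
theorem episode_slices_from_end_idxs_py_spec : Claim_equal_episode_slices_from_end_idxs_py := by
  intro T l _
  exact main_equiv T l
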